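-- pv_equiv track=rewrite | github.com/JHyeok-Choi/Coding_Practice | 프로그래머스/0/181860. 빈 배열에 추가， 삭제하기/빈 배열에 추가， 삭제하기.py | solution
-- ===== SOURCE A (Python) =====
-- def solution(arr, flag):
--     answer = []
--     for i in range(len(flag)):
--         if flag[i]:
--             for j in range(arr[i] * 2):
--                 answer.append(arr[i])
--         else:
--             del answer[-arr[i]:]
--
--     return answer
-- ===== SOURCE B (Python) =====
-- def solution(arr, flag):
--     # Run-length segment stack: O(#ops + output size) instead of O(total pushed+popped elements).
--     segs = []   # stack of (value, count), top at the end
--     total = 0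
--     for a, f in zip(arr, flag):
--         if f:
--             if a > 0:
--                 segs.append((a, 2 * a))
--                 total += 2 * a
--         else:
--             # del answer[-a:]  ==  truncate to length m (Python slice-bound clamping)
--             if a > 0:
--                 m = total - a
--                 if m < 0:
--                     m = 0
--             else:
--                 m = -a
--                 if m > total:
--                     m = total
--             while total > m:
--                 v, c = segs.pop()
--                 t = total - c
--                 if t < m:
--                     segs.append((v, m - t))
--                     total = m
--                 else:
--                     total = t
--     out = []
--     for v, c in segs:
--         out.extend([v] * c)
--     return out
-- ===== Notes on version B (the rewrite author's own statement) =====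
-- stated objective: faster
-- what changed: B replaces A's element-by-element push loop and slice deletion by a run-length stack of (value,count) segments with a single truncate-to-length operation, expanding the surviving segments once at the end, so cost is O(#operations + output size) instead of O(total elements ever pushed or deleted).
import Mathlib
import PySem

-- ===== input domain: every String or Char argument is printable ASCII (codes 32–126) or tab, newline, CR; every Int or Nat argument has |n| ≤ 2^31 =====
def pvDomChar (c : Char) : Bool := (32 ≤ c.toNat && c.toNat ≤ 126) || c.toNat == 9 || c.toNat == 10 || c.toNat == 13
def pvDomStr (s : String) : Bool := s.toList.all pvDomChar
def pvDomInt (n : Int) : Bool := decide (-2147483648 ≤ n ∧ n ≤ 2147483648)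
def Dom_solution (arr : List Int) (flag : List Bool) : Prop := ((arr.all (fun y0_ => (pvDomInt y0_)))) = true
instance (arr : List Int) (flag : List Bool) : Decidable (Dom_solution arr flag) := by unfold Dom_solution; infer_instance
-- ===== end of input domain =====

-- B replaces A's element-by-element pushes/deletions by a run-length segment stack
-- expanded once at the end (objective: faster for large pushed/popped counts).

-- ===== PORT A =====
-- literal port of A: for i in range(len(flag)): push arr[i] (arr[i]*2 times) or del answer[-arr[i]:].
-- pyGetD's defaults (0 / false) are only reached where Python raises IndexError (excluded by Pre_).
def solution (arr : List Int) (flag : List Bool) : List Int :=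
  (PySem.List.pyRange 0 (flag.length : Int) 1).foldl
    (fun answer i =>
      if PySem.List.pyGetD flag i false then
        (PySem.List.pyRange 0 ((PySem.List.pyGetD arr i 0) * 2) 1).foldl
          (fun ans _ => ans ++ [PySem.List.pyGetD arr i 0]) answer
      else
        PySem.List.slice answer none (some (-(PySem.List.pyGetD arr i 0))))
    []

-- ===== PORT B =====
-- the while-loop of Source B popping segments until total ≤ m; the stack is kept top-first (cons = append)
def altTruncate : List (Int × Int) → Int → Int → List (Int × Int) × Int
  | [], total, _ => ([], total)   -- pop from empty: unreachable under the loop invariant (total = stored length)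
  | (v, c) :: rest, total, m =>
    if total ≤ m then ((v, c) :: rest, total)
    else
      let t := total - c
      if t < m then ((v, m - t) :: rest, m) else altTruncate rest t m

-- one iteration of Source B's main for-loop over zip(arr, flag)
def altStep (st : List (Int × Int) × Int) (p : Int × Bool) : List (Int × Int) × Int :=
  if p.2 then
    if p.1 > 0 then ((p.1, 2 * p.1) :: st.1, st.2 + 2 * p.1) else st
  else
    let m := if p.1 > 0 then max (st.2 - p.1) 0 else min (-p.1) st.2
    altTruncate st.1 st.2 m

-- Source B's final expansion loop (bottom of stack first, hence reverse)
def altExpand (segs : List (Int × Int)) : List Int :=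
  segs.reverse.foldl (fun out p => out ++ List.replicate p.2.toNat p.1) []

def solution_alt (arr : List Int) (flag : List Bool) : List Int :=
  altExpand ((arr.zip flag).foldl altStep ([], 0)).1

-- ===== PRECONDITION & SPEC =====
-- Python A raises IndexError on arr[i] when len(arr) < len(flag); exactly those inputs are excluded.
def Pre_solution (arr : List Int) (flag : List Bool) : Prop := flag.length ≤ arr.length
instance (arr : List Int) (flag : List Bool) : Decidable (Pre_solution arr flag) := by
  unfold Pre_solution; infer_instance

def pvWitness_solution : List Int × List Bool := ([2, 1, 1], [true, true, false])

def Spec_solution (arr : List Int) (flag : List Bool) (out : List Int) : Prop := out = solution_alt arr flag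
instance (arr : List Int) (flag : List Bool) (out : List Int) : Decidable (Spec_solution arr flag out) := by unfold Spec_solution; infer_instance

-- ===== CLAIM (what is proved, stated in full; the proofs are below) =====
def Claim_equal_solution : Prop := ∀ (arr : List Int) (flag : List Bool), Dom_solution arr flag → Pre_solution arr flag → Spec_solution arr flag (solution arr flag)

-- ===== LEMMAS AND PROOFS =====

theorem altExpand_cons (v c : Int) (segs : List (Int × Int)) :
    altExpand ((v, c) :: segs) = altExpand segs ++ List.replicate c.toNat v := by
  simp [altExpand, List.foldl_append]

-- A's inner push loop appends r.length copies of a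
theorem foldl_append_const {α : Type} (a : α) :
    ∀ (r : List Int) (l : List α), r.foldl (fun ans _ => ans ++ [a]) l = l ++ List.replicate r.length a
  | [], l => by simp
  | _ :: r, l => by
    rw [List.foldl_cons, foldl_append_const a r (l ++ [a])]
    simp [List.append_assoc, List.replicate_succ]

-- the truncate loop computes take m on the expansion and maintains the invariant
theorem truncate_spec (m : Int) (hm : 0 ≤ m) :
    ∀ (segs : List (Int × Int)) (total : Int),
      (∀ p ∈ segs, 0 < p.2) → total = ((altExpand segs).length : Int) →
      altExpand (altTruncate segs total m).1 = (altExpand segs).take m.toNat ∧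
      (altTruncate segs total m).2 = ((altExpand (altTruncate segs total m).1).length : Int) ∧
      ∀ p ∈ (altTruncate segs total m).1, 0 < p.2
  | [], total, hpos, htot => by
    rw [altTruncate]
    exact ⟨by simp [altExpand], htot, hpos⟩
  | (v, c) :: rest, total, hpos, htot => by
    subst htot
    have hc : 0 < c := hpos (v, c) (by simp)
    have hlen : ((altExpand ((v, c) :: rest)).length : Int) = ((altExpand rest).length : Int) + c := by
      rw [altExpand_cons]; simp [Int.toNat_of_nonneg hc.le]
    rw [altTruncate]
    by_cases hle : ((altExpand ((v, c) :: rest)).length : Int) ≤ m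
    · have h1 : (altExpand ((v, c) :: rest)).length ≤ m.toNat := by omega
      simp only [hle, if_true]
      refine ⟨(List.take_of_length_le h1).symm, ?_, hpos⟩
      trivial
    · simp only [hle, if_false]
      by_cases ht : ((altExpand ((v, c) :: rest)).length : Int) - c < m
      · -- overshoot: keep (v, m - t) on top
        simp only [ht, if_true]
        have h1 : (altExpand rest).length ≤ m.toNat := by omega
        have hLc : (altExpand ((v, c) :: rest)).length = (altExpand rest).length + c.toNat := by
          rw [altExpand_cons]; simp
        refine ⟨?_, ?_, ?_⟩
        · rw [altExpand_cons, altExpand_cons, List.take_append,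
              List.take_of_length_le h1, List.take_replicate]
          simp only [List.length_append, List.length_replicate]
          congr 2
          omega
        · rw [altExpand_cons]
          simp only [List.length_append, List.length_replicate]
          have hK : (m - (((altExpand ((v, c) :: rest)).length : Int) - c)).toNat
              = m.toNat - (altExpand rest).length := by omega
          rw [hK]
          omega
        · intro p hp
          rw [List.mem_cons] at hp
          rcases hp with hp | hp
          · rw [hp]; simp; omega
          · exact hpos p (List.mem_cons_of_mem _ hp)
      · -- whole segment removed: recurse
        simp only [ht, if_false]
        have hrest := truncate_spec m hm rest (((altExpand ((v, c) :: rest)).length : Int) - c)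
          (fun p hp => hpos p (List.mem_cons_of_mem _ hp)) (by omega)
        refine ⟨?_, hrest.2.1, hrest.2.2⟩
        rw [hrest.1, altExpand_cons, List.take_append]
        have h2 : m.toNat - (altExpand rest).length = 0 := by omega
        simp [h2]

-- one step of A's loop equals one step of B's loop, through the invariant
theorem step_inv (a : Int) (f : Bool) (answer : List Int) (segs : List (Int × Int)) (total : Int)
    (hans : answer = altExpand segs) (htot : total = ((altExpand segs).length : Int))
    (hpos : ∀ p ∈ segs, 0 < p.2) :
    (if f then (PySem.List.pyRange 0 (a * 2) 1).foldl (fun ans _ => ans ++ [a]) answer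
     else PySem.List.slice answer none (some (-a)))
      = altExpand (altStep (segs, total) (a, f)).1 ∧
    (altStep (segs, total) (a, f)).2 = ((altExpand (altStep (segs, total) (a, f)).1).length : Int) ∧
    ∀ p ∈ (altStep (segs, total) (a, f)).1, 0 < p.2 := by
  have hlen0 : 0 ≤ total := by rw [htot]; positivity
  cases f with
  | true =>
    by_cases ha : a > 0
    · have h2a : (a * 2).toNat = (2 * a).toNat := by ring_nf
      simp only [altStep, ha, if_true, foldl_append_const, PySem.List.length_pyRange_one]
      refine ⟨?_, ?_, ?_⟩
      · rw [altExpand_cons, hans]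
        congr 1
        congr 1
        omega
      · rw [altExpand_cons]
        simp only [List.length_append, List.length_replicate]
        push_cast
        omega
      · intro p hp
        rw [List.mem_cons] at hp
        rcases hp with hp | hp
        · rw [hp]; simp; omega
        · exact hpos p hp
    · have hnil : PySem.List.pyRange 0 (a * 2) 1 = [] := by
        apply PySem.List.pyRange_one_eq_nil; omega
      have hstep : altStep (segs, total) (a, true) = (segs, total) := by simp [altStep, ha]
      rw [hstep, hnil]
      exact ⟨hans, htot, hpos⟩
  | false =>
    -- del answer[-a:]  keeps answer[:-a] = take (clampIdx len (-a))
    set m : Int := if a > 0 then max (total - a) 0 else min (-a) total with hm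
    have hm0 : 0 ≤ m := by rw [hm]; split_ifs <;> omega
    have hmle : m ≤ total := by rw [hm]; split_ifs <;> omega
    have htr := truncate_spec m hm0 segs total hpos htot
    have hslice : PySem.List.slice answer none (some (-a)) = answer.take m.toNat := by
      rcases lt_trichotomy a 0 with h | h | h
      · -- a < 0 : keep prefix of length -a (clamped by take)
        have : (-a) = ((-a).toNat : Int) := by omega
        rw [this, PySem.List.slice_to_natCast]
        have hml : m = min (-a) total := by rw [hm]; simp [not_lt.mpr h.le]
        rcases le_or_gt (-a) total with hcase | hcase
        · congr 1; omega
        · have h1 : answer.length ≤ (-a).toNat := by rw [hans]; omega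
          have h2 : answer.length ≤ m.toNat := by rw [hans]; omega
          rw [List.take_of_length_le h1, List.take_of_length_le h2]
      · have : (-a) = ((0:Nat) : Int) := by omega
        rw [this, PySem.List.slice_to_natCast]
        have : m = 0 := by omega
        simp [this]
      · -- a > 0 : drop the last a elements
        have ha' : 0 < a.toNat := by omega
        have : (-a) = -((a.toNat : Nat) : Int) := by omega
        rw [this, PySem.List.slice_to_neg_natCast _ _ ha']
        congr 1
        rw [hans]
        have hml : m = max (total - a) 0 := by rw [hm]; simp [h]
        omega
    refine ⟨?_, ?_, htr.2.2⟩
    · simp only [altStep, Bool.false_eq_true, if_false, ← hm]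
      rw [hslice, htr.1, hans]
    · simp only [altStep, Bool.false_eq_true, if_false, ← hm]
      exact htr.2.1

-- folding A's body and B's body over the same pair list preserves the invariant
theorem loop_inv :
    ∀ (ps : List (Int × Bool)) (answer : List Int) (segs : List (Int × Int)) (total : Int),
      answer = altExpand segs → total = ((altExpand segs).length : Int) → (∀ p ∈ segs, 0 < p.2) →
      ps.foldl
          (fun ans p =>
            if p.2 then (PySem.List.pyRange 0 (p.1 * 2) 1).foldl (fun l _ => l ++ [p.1]) ans
            else PySem.List.slice ans none (some (-p.1))) answer
        = altExpand ((ps.foldl altStep (segs, total)).1)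
  | [], answer, segs, total, hans, _, _ => by simpa using hans
  | (a, f) :: ps, answer, segs, total, hans, htot, hpos => by
    have hstep := step_inv a f answer segs total hans htot hpos
    simp only [List.foldl_cons]
    have : altStep (segs, total) (a, f)
        = ((altStep (segs, total) (a, f)).1, (altStep (segs, total) (a, f)).2) := rfl
    rw [this]
    exact loop_inv ps _ _ _ hstep.1 hstep.2.1 hstep.2.2

-- A's fold over range(len(flag)) with indexing = fold over the zipped lists
theorem foldl_range_zip {α β γ : Type} (f : γ → α → β → γ) (dx : α) (dy : β) :
    ∀ (ys : List β) (xs : List α) (init : γ), ys.length ≤ xs.length →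
      (List.range ys.length).foldl (fun acc i => f acc (xs.getD i dx) (ys.getD i dy)) init
        = (xs.zip ys).foldl (fun acc p => f acc p.1 p.2) init
  | [], xs, init, _ => by simp
  | y :: ys, xs, init, hlen => by
    cases xs with
    | nil => simp at hlen
    | cons x xs =>
      rw [List.length_cons, List.range_succ_eq_map, List.foldl_cons, List.foldl_map]
      simp only [List.getD_cons_zero, List.getD_cons_succ]
      rw [foldl_range_zip f dx dy ys xs (f init x y) (by simpa using hlen)]
      simp

-- ===== VERDICT (by name: the statement is the Claim_ definition above) =====
theorem solution_spec : Claim_equal_solution := by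
  intro arr flag _ hpre
  unfold Spec_solution solution solution_alt
  rw [PySem.List.pyRange_one]
  simp only [Int.sub_zero, Int.toNat_natCast, List.foldl_map, zero_add,
    PySem.List.pyGetD_natCast]
  refine Eq.trans
    (foldl_range_zip
      (fun acc (x : Int) (y : Bool) =>
        if y then (PySem.List.pyRange 0 (x * 2) 1).foldl (fun l _ => l ++ [x]) acc
        else PySem.List.slice acc none (some (-x)))
      0 false flag arr [] hpre) ?_
  exact loop_inv (arr.zip flag) [] [] 0 rfl rfl (by simp)
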